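-- pv_equiv track=rewrite | github.com/aymen68212-create/SAE1.05 | SAE.py | trier_et_filtrer
-- ===== SOURCE A (Python) =====
-- TAILLE_MIN_MIB = 10
--
-- NB_MAX_FICHIERS = 100
--
-- MIB_EN_OCTETS = 1048576
--
-- def trier_et_filtrer(liste_fichiers):
--     """
--     - Trie du plus gros au plus petit
--     - Supprime les fichiers < taille minimale
--     - Limite à NB_MAX_FICHIERS
--     """
--
--     liste_fichiers = sorted(
--         liste_fichiers,
--         key=lambda fichier: fichier[1],
--         reverse=True
--     )
--
--
--     liste_filtrée = []
--     for fichier in liste_fichiers: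
--         if fichier[1] >= TAILLE_MIN_MIB * MIB_EN_OCTETS:
--             liste_filtrée.append(fichier)
--
--
--     return liste_filtrée[:NB_MAX_FICHIERS]
-- ===== SOURCE B (Python) =====
-- TAILLE_MIN_MIB = 10
--
-- NB_MAX_FICHIERS = 100
--
-- MIB_EN_OCTETS = 1048576
--
-- def trier_et_filtrer(liste_fichiers):
--     """Single pass: keep a descending top-NB_MAX_FICHIERS list of the big-enough
--     files by bounded insertion, instead of sorting everything then filtering."""
--     seuil = TAILLE_MIN_MIB * MIB_EN_OCTETS
--     top = []
--     for fichier in liste_fichiers: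
--         if fichier[1] >= seuil:
--             i = 0
--             while i < len(top) and top[i][1] >= fichier[1]:
--                 i += 1
--             top.insert(i, fichier)
--             if len(top) > NB_MAX_FICHIERS:
--                 top.pop()
--     return top
-- ===== Notes on version B (the rewrite author's own statement) =====
-- stated objective: alternative
-- what changed: B replaces A's full stable sort + filter loop + slice by a single pass that keeps only the current top-NB_MAX_FICHIERS big-enough files in a bounded descending list via stable insertion (insert before the first strictly smaller element, pop the smallest when over capacity).
import Mathlib
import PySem

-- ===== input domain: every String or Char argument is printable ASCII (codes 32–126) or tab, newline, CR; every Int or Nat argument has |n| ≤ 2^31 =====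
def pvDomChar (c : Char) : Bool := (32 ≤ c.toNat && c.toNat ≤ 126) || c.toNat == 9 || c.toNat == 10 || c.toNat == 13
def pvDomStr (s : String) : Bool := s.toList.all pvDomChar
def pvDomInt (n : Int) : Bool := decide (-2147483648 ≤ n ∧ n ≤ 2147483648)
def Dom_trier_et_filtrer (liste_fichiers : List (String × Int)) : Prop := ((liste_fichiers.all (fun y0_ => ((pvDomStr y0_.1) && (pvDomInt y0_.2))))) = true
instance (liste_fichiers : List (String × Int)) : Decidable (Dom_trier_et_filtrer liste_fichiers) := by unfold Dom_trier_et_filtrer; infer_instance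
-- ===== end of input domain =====

-- B keeps a bounded (≤ 100) descending top list by stable insertion in one pass,
-- instead of A's full stable sort followed by a filter loop and a slice.

def pvTAILLE_MIN_MIB : Int := 10
def pvNB_MAX_FICHIERS : Int := 100
def pvMIB_EN_OCTETS : Int := 1048576

-- ===== PORT A =====
def trier_et_filtrer (liste_fichiers : List (String × Int)) : List (String × Int) :=
  -- liste_fichiers = sorted(liste_fichiers, key=lambda fichier: fichier[1], reverse=True)
  let liste_fichiers := PySem.List.sorted liste_fichiers (fun fichier => fichier.2) true
  -- loop appending the files of size ≥ TAILLE_MIN_MIB * MIB_EN_OCTETS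
  let liste_filtree := liste_fichiers.foldl
    (fun acc fichier =>
      if fichier.2 ≥ pvTAILLE_MIN_MIB * pvMIB_EN_OCTETS then acc ++ [fichier] else acc) []
  -- liste_filtrée[:NB_MAX_FICHIERS]
  PySem.List.slice liste_filtree none (some pvNB_MAX_FICHIERS)

-- ===== PORT B =====
-- the inner while/insert of Source B: insert fichier before the first strictly smaller element
def pvInsTop (fichier : String × Int) (top : List (String × Int)) : List (String × Int) :=
  match top with
  | [] => [fichier]
  | y :: t => if y.2 < fichier.2 then fichier :: y :: t else y :: pvInsTop fichier t

def trier_et_filtrer_alt (liste_fichiers : List (String × Int)) : List (String × Int) :=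
  let seuil := pvTAILLE_MIN_MIB * pvMIB_EN_OCTETS
  liste_fichiers.foldl
    (fun top fichier =>
      if fichier.2 ≥ seuil then
        let t := pvInsTop fichier top
        -- if len(top) > NB_MAX_FICHIERS: top.pop()
        if (t.length : Int) > pvNB_MAX_FICHIERS then t.dropLast else t
      else top) []

-- ===== PRECONDITION & SPEC =====
def Spec_trier_et_filtrer (liste_fichiers : List (String × Int)) (out : List (String × Int)) : Prop := out = trier_et_filtrer_alt liste_fichiers
instance (liste_fichiers : List (String × Int)) (out : List (String × Int)) : Decidable (Spec_trier_et_filtrer liste_fichiers out) := by unfold Spec_trier_et_filtrer; infer_instance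

-- ===== CLAIM (what is proved, stated in full; the proofs are below) =====
def Claim_equal_trier_et_filtrer : Prop := ∀ (liste_fichiers : List (String × Int)), Dom_trier_et_filtrer liste_fichiers → Spec_trier_et_filtrer liste_fichiers (trier_et_filtrer liste_fichiers)

-- ===== LEMMAS AND PROOFS =====

-- shorthand used by the proofs only
def pvBef (a b : String × Int) : Bool := decide (b.2 < a.2)
def pvP (f : String × Int) : Bool := decide (f.2 ≥ pvTAILLE_MIN_MIB * pvMIB_EN_OCTETS)

theorem pvInsTop_eq (f : String × Int) (top : List (String × Int)) :
    pvInsTop f top = PySem.List.insertBy pvBef f top := by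
  induction top with
  | nil => rfl
  | cons y t ih => simp [pvInsTop, PySem.List.insertBy, pvBef, ih]

theorem pvLength_insertBy (f : String × Int) (ys : List (String × Int)) :
    (PySem.List.insertBy pvBef f ys).length = ys.length + 1 := by
  induction ys with
  | nil => rfl
  | cons y t ih =>
    simp only [PySem.List.insertBy]
    split <;> simp [ih]

theorem pvInsertBy_all_lt (f : String × Int) (ys : List (String × Int))
    (h : ∀ z ∈ ys, z.2 < f.2) : PySem.List.insertBy pvBef f ys = f :: ys := by
  cases ys with
  | nil => rfl
  | cons y t =>
    have : pvBef f y = true := by simp [pvBef]; exact h y (by simp)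
    simp [PySem.List.insertBy, this]

theorem pvTake_insertBy_take (f : String × Int) (k : Nat) (ys : List (String × Int)) :
    (PySem.List.insertBy pvBef f (ys.take k)).take k = (PySem.List.insertBy pvBef f ys).take k := by
  induction ys generalizing k with
  | nil => simp
  | cons y t ih =>
    cases k with
    | zero => simp
    | succ k' =>
      simp only [List.take_succ_cons, PySem.List.insertBy]
      split
      · simp only [List.take_succ_cons]
        cases k' with
        | zero => simp
        | succ m => simp [List.take_succ_cons, List.take_take]
      · simp only [List.take_succ_cons, ih k']

theorem pvFilter_insertBy (p : (String × Int) → Bool) (f : String × Int)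
    (ys : List (String × Int)) (hs : ys.Pairwise (fun a b => b.2 ≤ a.2)) :
    (PySem.List.insertBy pvBef f ys).filter p =
      if p f then PySem.List.insertBy pvBef f (ys.filter p) else ys.filter p := by
  induction ys with
  | nil =>
    by_cases hp : p f <;> simp [PySem.List.insertBy, List.filter, hp]
  | cons y t ih =>
    have hhead : ∀ z ∈ t, z.2 ≤ y.2 := fun z hz => (List.pairwise_cons.1 hs).1 z hz
    have htail := (List.pairwise_cons.1 hs).2
    simp only [PySem.List.insertBy]
    by_cases hb : pvBef f y = true
    · rw [if_pos hb]
      have hy : y.2 < f.2 := by simpa [pvBef] using hb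
      by_cases hp : p f
      · have hall : ∀ z ∈ (y :: t).filter p, z.2 < f.2 := by
          intro z hz
          rcases List.mem_cons.1 (List.mem_of_mem_filter hz) with h | h
          · subst h; exact hy
          · exact lt_of_le_of_lt (hhead z h) hy
        rw [if_pos hp, pvInsertBy_all_lt f _ hall]
        simp [hp]
      · rw [if_neg hp]
        simp [List.filter_cons, hp]
    · rw [if_neg hb]
      have lhs : List.filter p (y :: PySem.List.insertBy pvBef f t) =
          (if p y then [y] else []) ++ List.filter p (PySem.List.insertBy pvBef f t) := by
        by_cases hpy : p y <;> simp [hpy]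
      rw [lhs, ih htail]
      by_cases hp : p f
      · rw [if_pos hp, if_pos hp]
        by_cases hpy : p y
        · simp [hpy, PySem.List.insertBy, hb]
        · simp [hpy]
      · by_cases hpy : p y <;> simp [hp, hpy]

-- sorted of an appended element is an insertion
theorem pvSorted_concat (l : List (String × Int)) (x : String × Int) :
    PySem.List.sorted (l ++ [x]) (fun f => f.2) true =
      PySem.List.insertBy pvBef x (PySem.List.sorted l (fun f => f.2) true) := by
  rw [PySem.List.sorted_rev_eq_foldl_insertBy, PySem.List.sorted_rev_eq_foldl_insertBy,
    List.foldl_append]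
  rfl

-- filter commutes with the stable descending sort
theorem pvFilter_sorted (p : (String × Int) → Bool) (l : List (String × Int)) :
    (PySem.List.sorted l (fun f => f.2) true).filter p =
      PySem.List.sorted (l.filter p) (fun f => f.2) true := by
  induction l using List.reverseRecOn with
  | nil => rfl
  | append_singleton l x ih =>
    rw [pvSorted_concat, pvFilter_insertBy p x _ (PySem.List.sorted_pairwise_rev l _),
      List.filter_append]
    by_cases hp : p x
    · simp [hp, pvSorted_concat, ih]
    · simp [hp, ih]

-- B's bounded step equals "take 100 after the unbounded insertion step"
theorem pvFoldl_bounded (l : List (String × Int)) :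
    ∀ acc : List (String × Int),
      l.foldl
        (fun top fichier =>
          if fichier.2 ≥ pvTAILLE_MIN_MIB * pvMIB_EN_OCTETS then
            let t := pvInsTop fichier top
            if (t.length : Int) > pvNB_MAX_FICHIERS then t.dropLast else t
          else top) (acc.take 100) =
      (l.foldl
        (fun top fichier =>
          if pvP fichier then PySem.List.insertBy pvBef fichier top else top) acc).take 100 := by
  induction l with
  | nil => intro acc; rfl
  | cons x l ih =>
    intro acc
    simp only [List.foldl_cons]
    by_cases hp : pvP x
    · have hp' : x.2 ≥ pvTAILLE_MIN_MIB * pvMIB_EN_OCTETS := by simpa [pvP] using hp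
      rw [if_pos hp', if_pos hp]
      have hstep :
          (let t := pvInsTop x (acc.take 100);
            if (t.length : Int) > pvNB_MAX_FICHIERS then t.dropLast else t) =
            (PySem.List.insertBy pvBef x acc).take 100 := by
        simp only [pvInsTop_eq]
        have hlen := pvLength_insertBy x (acc.take 100)
        have hle : (acc.take 100).length ≤ 100 := by
          simp
        by_cases hbig : (acc.take 100).length = 100
        · have h101 : (PySem.List.insertBy pvBef x (acc.take 100)).length = 101 := by omega
          have : ((PySem.List.insertBy pvBef x (acc.take 100)).length : Int) > pvNB_MAX_FICHIERS := by
            rw [h101]; norm_num [pvNB_MAX_FICHIERS]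
          rw [if_pos this]
          rw [List.dropLast_eq_take, h101]
          have : (PySem.List.insertBy pvBef x (acc.take 100)).take 100 =
              (PySem.List.insertBy pvBef x acc).take 100 := pvTake_insertBy_take x 100 acc
          simpa using this
        · have hlt : (acc.take 100).length < 100 := lt_of_le_of_ne hle hbig
          have hsm : ¬ ((PySem.List.insertBy pvBef x (acc.take 100)).length : Int) > pvNB_MAX_FICHIERS := by
            rw [hlen]; push_cast; simp only [pvNB_MAX_FICHIERS]; omega
          rw [if_neg hsm]
          rw [← pvTake_insertBy_take x 100 acc]
          exact (List.take_of_length_le (by omega)).symm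
      rw [hstep, ih]
    · have hp' : ¬ x.2 ≥ pvTAILLE_MIN_MIB * pvMIB_EN_OCTETS := by simpa [pvP] using hp
      rw [if_neg hp', if_neg hp, ih]

-- ===== VERDICT (by name: the statement is the Claim_ definition above) =====
theorem trier_et_filtrer_spec : Claim_equal_trier_et_filtrer := by
  intro l _
  unfold Spec_trier_et_filtrer trier_et_filtrer trier_et_filtrer_alt
  simp only []
  -- A's filter loop is List.filter, its slice is take 100
  rw [show ∀ (xs : List (String × Int)),
      (xs.foldl (fun acc fichier =>
        if fichier.2 ≥ pvTAILLE_MIN_MIB * pvMIB_EN_OCTETS then acc ++ [fichier] else acc) []) =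
      xs.filter pvP from fun xs => by
        simpa [pvP] using PySem.List.foldl_append_if pvP id xs []]
  rw [show PySem.List.slice ((PySem.List.sorted l (fun f => f.2) true).filter pvP) none (some pvNB_MAX_FICHIERS) =
      ((PySem.List.sorted l (fun f => f.2) true).filter pvP).take 100 from by
        simpa [pvNB_MAX_FICHIERS] using
          PySem.List.slice_to_natCast ((PySem.List.sorted l (fun f => f.2) true).filter pvP) 100]
  rw [pvFilter_sorted pvP l, PySem.List.sorted_rev_eq_foldl_insertBy]
  have h1 : (l.filter pvP).foldl
      (fun acc x => PySem.List.insertBy (fun a b => decide (b.2 < a.2)) x acc) [] =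
      l.foldl (fun top fichier => if pvP fichier then PySem.List.insertBy pvBef fichier top else top) [] := by
    rw [List.foldl_filter]; rfl
  rw [h1, ← pvFoldl_bounded l []]
  rfl
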